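-- pv_equiv track=rewrite | github.com/daniel-reich/turbo-robot | J7HPbiP9WRTCteazx_11.py | n_differences
-- ===== SOURCE A (Python) =====
-- def n_differences(lst):
--     a2 =[]
--     c1 = lst.copy()
--     while True:
--         if len(c1)==1:break
--         for i in range(len(c1)-1):
--             a2.append(c1[i+1]-c1[i])
--         c1 = a2
--         a2=[]
--     return c1[0]
-- ===== SOURCE B (Python) =====
-- def n_differences(lst):
--     n = len(lst)
--     total = 0
--     c = 1 if (n - 1) % 2 == 0 else -1  # (-1)^(n-1) = C(n-1,0) with sign
--     for k, x in enumerate(lst):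
--         total += c * x
--         c = -c * (n - 1 - k) // (k + 1)  # exact: binomial recurrence
--     return total
-- ===== Notes on version B (the rewrite author's own statement) =====
-- stated objective: faster
-- what changed: Replaces A's O(n^2) repeated construction of successive difference tables with a single pass summing (-1)^(n-1-k)*C(n-1,k)*lst[k], updating the binomial coefficient incrementally by one exact integer division per element.
import Mathlib
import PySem

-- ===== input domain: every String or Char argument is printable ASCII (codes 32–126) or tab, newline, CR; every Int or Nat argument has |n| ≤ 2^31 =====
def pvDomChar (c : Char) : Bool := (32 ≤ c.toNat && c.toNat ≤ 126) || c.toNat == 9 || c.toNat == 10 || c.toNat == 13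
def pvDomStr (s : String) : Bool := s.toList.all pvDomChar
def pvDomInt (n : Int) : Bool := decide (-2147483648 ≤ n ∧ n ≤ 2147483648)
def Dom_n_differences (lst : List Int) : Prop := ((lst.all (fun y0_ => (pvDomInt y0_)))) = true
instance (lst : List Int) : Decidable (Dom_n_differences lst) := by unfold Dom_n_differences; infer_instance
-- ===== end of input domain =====

-- B replaces A's O(n^2) repeated difference-table construction by the one-pass binomial
-- closed form sum_k (-1)^(n-1-k) * C(n-1,k) * lst[k] with incrementally updated coefficients.

-- ===== PORT A =====
-- one pass of A's inner for-loop: a2.append(c1[i+1] - c1[i]) for i in range(len(c1)-1)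
-- (indices i, i+1 are provably in range, so pyGetD is exact here)
def nDiffStep (c1 : List Int) : List Int :=
  (PySem.List.pyRange 0 ((c1.length : Int) - 1) 1).foldl
    (fun a2 i => a2 ++ [PySem.List.pyGetD c1 (i + 1) 0 - PySem.List.pyGetD c1 i 0]) []

-- characterisation of one pass; cited (via nDiffStep_length) by the loop's decreasing_by
lemma nDiffStep_eq (c1 : List Int) :
    nDiffStep c1 = (List.range (c1.length - 1)).map
      (fun k => c1.getD (k + 1) 0 - c1.getD k 0) := by
  unfold nDiffStep
  rw [PySem.List.foldl_append_singleton_eq_map, PySem.List.pyRange_one, List.map_map,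
    List.nil_append]
  have h : ((c1.length : Int) - 1 - 0).toNat = c1.length - 1 := by omega
  rw [h]
  apply List.map_congr_left
  intro k hk
  simp only [Function.comp_apply, zero_add]
  rw [show ((k : Int) + 1) = ((k + 1 : ℕ) : Int) from by push_cast; ring,
    PySem.List.pyGetD_natCast, PySem.List.pyGetD_natCast]

lemma nDiffStep_length (c1 : List Int) : (nDiffStep c1).length = c1.length - 1 := by
  rw [nDiffStep_eq]; simp

-- A's while loop; Python loops forever on the empty list (excluded by Pre_), the guard
-- `c1.length = 0` only makes the recursion total there.
def nDiffWhile (c1 : List Int) : Int :=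
  if c1.length = 1 then PySem.List.pyGetD c1 0 0
  else if c1.length = 0 then 0
  else nDiffWhile (nDiffStep c1)
termination_by c1.length
decreasing_by
  rw [nDiffStep_length]; omega

def n_differences (lst : List Int) : Int := nDiffWhile lst

-- ===== PORT B =====
def n_differences_alt (lst : List Int) : Int :=
  let n : Int := lst.length
  let c0 : Int := if PySem.Int.mod (n - 1) 2 = 0 then 1 else -1
  ((PySem.List.enumerate lst 0).foldl
      (fun (st : Int × Int) kx =>
        (st.1 + st.2 * kx.2, PySem.Int.floordiv (-st.2 * (n - 1 - kx.1)) (kx.1 + 1)))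
      (0, c0)).1

-- ===== PRECONDITION & SPEC =====
-- Pre_ excludes only the empty list, on which A's while loop never terminates (it loops forever).
def Pre_n_differences (lst : List Int) : Prop := lst ≠ []
instance (lst : List Int) : Decidable (Pre_n_differences lst) := by unfold Pre_n_differences; infer_instance
def pvWitness_n_differences : List Int := [3, 1, 4]

def Spec_n_differences (lst : List Int) (out : Int) : Prop := out = n_differences_alt lst
instance (lst : List Int) (out : Int) : Decidable (Spec_n_differences lst out) := by unfold Spec_n_differences; infer_instance

-- ===== CLAIM (what is proved, stated in full; the proofs are below) =====
def Claim_equal_n_differences : Prop := ∀ (lst : List Int), Dom_n_differences lst → Pre_n_differences lst → Spec_n_differences lst (n_differences lst)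

-- ===== LEMMAS AND PROOFS =====

-- signed binomial coefficient; (-1)^(m+k) = (-1)^(m-k) for the k ≤ m that matter
def coefZ (m k : ℕ) : ℤ := (-1) ^ (m + k) * (Nat.choose m k : ℤ)

-- the common reference value: sum_k coefZ (n-1) k * lst[k]
def Sval (l : List Int) : ℤ :=
  ∑ k ∈ Finset.range l.length, coefZ (l.length - 1) k * l.getD k 0

lemma coefZ_succ (m k : ℕ) (hm : 1 ≤ m) :
    coefZ m (k + 1) = coefZ (m - 1) k - coefZ (m - 1) (k + 1) := by
  obtain ⟨m', rfl⟩ : ∃ m', m = m' + 1 := ⟨m - 1, by omega⟩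
  simp only [coefZ, Nat.add_sub_cancel, Nat.choose_succ_succ]
  push_cast
  ring

lemma coefZ_zero_succ (m' : ℕ) : coefZ (m' + 1) 0 = -coefZ m' 0 := by
  simp [coefZ, pow_succ]

-- the finite-difference identity on abstract coefficients
lemma sum_diff_identity (m : ℕ) (hm : 1 ≤ m) (a : ℕ → ℤ) :
    ∑ k ∈ Finset.range m, coefZ (m - 1) k * (a (k + 1) - a k)
      = ∑ k ∈ Finset.range (m + 1), coefZ m k * a k := by
  obtain ⟨m', rfl⟩ : ∃ m', m = m' + 1 := ⟨m - 1, by omega⟩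
  simp only [Nat.add_sub_cancel]
  rw [Finset.sum_range_succ' (fun k => coefZ (m' + 1) k * a k) (m' + 1)]
  have e1 : ∀ k ∈ Finset.range (m' + 1), coefZ (m' + 1) (k + 1) * a (k + 1)
      = coefZ m' k * a (k + 1) - coefZ m' (k + 1) * a (k + 1) := by
    intro k _
    rw [coefZ_succ (m' + 1) k (by omega)]
    simp only [Nat.add_sub_cancel]
    ring
  rw [Finset.sum_congr rfl e1, Finset.sum_sub_distrib]
  have e2 : ∑ k ∈ Finset.range (m' + 1), coefZ m' (k + 1) * a (k + 1)
      = ∑ k ∈ Finset.range (m' + 1), coefZ m' k * a k - coefZ m' 0 * a 0 := by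
    have h1 := Finset.sum_range_succ' (fun k => coefZ m' k * a k) (m' + 1)
    have h2 := Finset.sum_range_succ (fun k => coefZ m' k * a k) (m' + 1)
    have h0 : coefZ m' (m' + 1) * a (m' + 1) = 0 := by
      simp [coefZ]
    simp only [h0] at h2
    linarith [h1, h2]
  rw [e2, coefZ_zero_succ m']
  have e3 : ∀ k ∈ Finset.range (m' + 1), coefZ m' k * (a (k + 1) - a k)
      = coefZ m' k * a (k + 1) - coefZ m' k * a k := by
    intro k _; ring
  rw [Finset.sum_congr rfl e3, Finset.sum_sub_distrib]
  ring

lemma Sval_diffstep (l : List Int) (h : 2 ≤ l.length) :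
    Sval (nDiffStep l) = Sval l := by
  obtain ⟨m, hm⟩ : ∃ m, l.length = m + 1 := ⟨l.length - 1, by omega⟩
  have hm1 : 1 ≤ m := by omega
  rw [nDiffStep_eq]
  unfold Sval
  simp only [List.length_map, List.length_range, hm, Nat.add_sub_cancel]
  have hget : ∀ k ∈ Finset.range m,
      coefZ (m - 1) k * ((List.range m).map (fun k => l.getD (k + 1) 0 - l.getD k 0)).getD k 0
        = coefZ (m - 1) k * (l.getD (k + 1) 0 - l.getD k 0) := by
    intro k hk
    rw [PySem.List.getD_map_range _ _ _ _ (by simpa using hk)]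
  rw [Finset.sum_congr rfl hget]
  exact sum_diff_identity m hm1 (fun k => l.getD k 0)

lemma while_eq_S : ∀ (n : ℕ) (l : List Int), l.length = n → 1 ≤ n → nDiffWhile l = Sval l := by
  intro n
  induction n using Nat.strong_induction_on with
  | _ n ih =>
    intro l hl h1
    rw [nDiffWhile]
    by_cases hone : l.length = 1
    · rw [if_pos hone]
      obtain ⟨x, rfl⟩ : ∃ x, l = [x] := by
        match l, hone with
        | [x], _ => exact ⟨x, rfl⟩
      simp [Sval, coefZ, PySem.List.pyGetD_zero]
    · have h2 : 2 ≤ l.length := by omega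
      rw [if_neg hone, if_neg (by omega)]
      have hlen : (nDiffStep l).length = l.length - 1 := nDiffStep_length l
      rw [ih (l.length - 1) (by omega) (nDiffStep l) hlen (by omega)]
      exact Sval_diffstep l h2

-- exact coefficient update: Python's floor division is exact here
lemma coef_step (N : Int) (m : ℕ) (hN : N = (m : Int) + 1) (j : ℕ) (hj : j ≤ m) :
    PySem.Int.floordiv (-(coefZ m j) * (N - 1 - (j : Int))) ((j : Int) + 1) = coefZ m (j + 1) := by
  have hsub : N - 1 - (j : Int) = ((m - j : ℕ) : Int) := by
    rw [hN, Nat.cast_sub hj]; ring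
  rw [hsub]
  have hcast : ((Nat.choose m (j + 1) * (j + 1) : ℕ) : ℤ) = ((Nat.choose m j * (m - j) : ℕ) : ℤ) := by
    exact_mod_cast congrArg (Nat.cast (R := ℤ)) (Nat.choose_succ_right_eq m j)
  have hnum : -(coefZ m j) * ((m - j : ℕ) : Int) = coefZ m (j + 1) * ((j : Int) + 1) := by
    unfold coefZ
    push_cast [Nat.cast_sub hj] at hcast ⊢
    linear_combination (-(-1 : ℤ) ^ (m + j + 1)) * hcast
  rw [hnum, PySem.Int.floordiv_eq_ediv_of_pos (by omega : (0 : ℤ) < (j : ℤ) + 1)]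
  exact Int.mul_ediv_cancel _ (by omega)

lemma foldB_inv (N : Int) (m : ℕ) (hN : N = (m : Int) + 1) :
    ∀ (rest : List Int) (j : ℕ) (t : Int), j + rest.length ≤ m + 1 →
    ((PySem.List.enumerate rest (j : Int)).foldl
      (fun (st : Int × Int) kx =>
        (st.1 + st.2 * kx.2, PySem.Int.floordiv (-st.2 * (N - 1 - kx.1)) (kx.1 + 1)))
      (t, coefZ m j)).1
    = t + ∑ i ∈ Finset.range rest.length, coefZ m (j + i) * rest.getD i 0 := by
  intro rest
  induction rest with
  | nil => intro j t _; simp [PySem.List.enumerate]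
  | cons x rest' ih =>
    intro j t hb
    rw [PySem.List.enumerate_cons]
    simp only [List.foldl_cons]
    have hj : j ≤ m := by simp at hb; omega
    have hc : PySem.Int.floordiv (-(coefZ m j) * (N - 1 - (j : Int))) ((j : Int) + 1)
        = coefZ m (j + 1) := coef_step N m hN j hj
    have hcast : (j : Int) + 1 = ((j + 1 : ℕ) : Int) := by push_cast; ring
    rw [hc, hcast, ih (j + 1) (t + coefZ m j * x) (by simp at hb ⊢; omega)]
    rw [List.length_cons, Finset.sum_range_succ']
    simp only [List.getD_cons_succ, List.getD_cons_zero]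
    have : ∀ i, j + 1 + i = j + (i + 1) := by omega
    simp only [this]
    ring

lemma alt_eq_S (l : List Int) (h : l ≠ []) : n_differences_alt l = Sval l := by
  obtain ⟨m, hm⟩ : ∃ m, l.length = m + 1 := ⟨l.length - 1, by
    cases l with
    | nil => exact absurd rfl h
    | cons a t => simp⟩
  unfold n_differences_alt
  have hc0 : (if PySem.Int.mod ((l.length : Int) - 1) 2 = 0 then (1 : Int) else -1)
      = coefZ m 0 := by
    have h1 : (l.length : Int) - 1 = ((m : ℕ) : Int) := by omega
    rw [h1, show ((2 : Int)) = ((2 : ℕ) : Int) from rfl, PySem.Int.mod_natCast]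
    rcases Nat.even_or_odd m with he | ho
    · rw [if_pos (by exact_mod_cast congrArg (Nat.cast (R := ℤ)) (Nat.even_iff.mp he))]
      simp [coefZ, he.neg_one_pow]
    · rw [if_neg (by
        have := Nat.odd_iff.mp ho
        simp [this])]
      simp [coefZ, ho.neg_one_pow]
  simp only [hc0]
  have hF := foldB_inv (l.length : Int) m (by omega) l 0 0 (by omega)
  simp only [Nat.cast_zero] at hF
  rw [hF]
  simp [Sval, hm]

-- ===== VERDICT (by name: the statement is the Claim_ definition above) =====
theorem n_differences_spec : Claim_equal_n_differences := by
  intro lst _ hpre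
  unfold Spec_n_differences
  have h1 : 1 ≤ lst.length := by
    cases lst with
    | nil => exact absurd rfl hpre
    | cons a t => simp
  rw [show n_differences lst = nDiffWhile lst from rfl,
    while_eq_S lst.length lst rfl h1, alt_eq_S lst hpre]
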